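-- pv_equiv track=rewrite | github.com/denster32/mercury-cli | evals/repair_benchmark/run.py | upsert_section_value
-- ===== SOURCE A (Python) =====
-- def upsert_section_value(text: str, section: str, key: str, rendered_value: str) -> str:
--     header = f"[{section}]"
--     replacement = f"{key} = {rendered_value}"
--     lines = text.splitlines()
--     out: list[str] = []
--     in_section = False
--     section_found = False
--     key_written = False
--
--     for index, line in enumerate(lines):
--         stripped = line.strip()
--         is_header = stripped.startswith("[") and stripped.endswith("]")
--         if is_header:
--             if in_section and not key_written:
--                 out.append(replacement)
--                 key_written = True
--             in_section = stripped == header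
--             section_found = section_found or in_section
--             out.append(line)
--             continue
--         if in_section and stripped.startswith(f"{key} ="):
--             if not key_written:
--                 out.append(replacement)
--                 key_written = True
--             continue
--         out.append(line)
--         if index == len(lines) - 1 and in_section and not key_written:
--             out.append(replacement)
--             key_written = True
--
--     if section_found:
--         return "\n".join(out).rstrip() + "\n"
--
--     prefix = text.rstrip()
--     if prefix:
--         prefix += "\n\n"
--     return f"{prefix}[{section}]\n{replacement}\n"
-- ===== SOURCE B (Python) =====
-- def upsert_section_value(text: str, section: str, key: str, rendered_value: str) -> str:
--     header = f"[{section}]"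
--     replacement = f"{key} = {rendered_value}"
--     key_prefix = f"{key} ="
--
--     def is_header_line(line: str) -> bool:
--         s = line.strip()
--         return s.startswith("[") and s.endswith("]")
--
--     lines = text.splitlines()
--
--     # split off everything before the first occurrence of the section header
--     pre, rest = [], lines
--     while rest and rest[0].strip() != header:
--         pre.append(rest[0])
--         rest = rest[1:]
--
--     if not rest:  # section absent: append a fresh section at the end
--         prefix = text.rstrip()
--         if prefix:
--             prefix += "\n\n"
--         return f"{prefix}{header}\n{replacement}\n"
--
--     head, after = rest[0], rest[1:]
--
--     # the section body runs until the next header line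
--     body = []
--     while after and not is_header_line(after[0]):
--         body.append(after[0])
--         after = after[1:]
--
--     # rewrite the body: replace the first key line, drop later ones, append if absent
--     new_body, replaced = [], False
--     for line in body:
--         if line.strip().startswith(key_prefix):
--             if not replaced:
--                 new_body.append(replacement)
--                 replaced = True
--         else:
--             new_body.append(line)
--     if not replaced:
--         new_body.append(replacement)
--
--     # later occurrences of the section must also lose their stale key lines
--     cleaned, inside = [], False
--     for line in after:
--         if is_header_line(line):
--             inside = line.strip() == header
--             cleaned.append(line)
--         elif inside and line.strip().startswith(key_prefix):
--             continue
--         else: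
--             cleaned.append(line)
--
--     return "\n".join(pre + [head] + new_body + cleaned).rstrip() + "\n"
-- ===== Notes on version B (the rewrite author's own statement) =====
-- stated objective: alternative
-- what changed: Replaces A's single four-flag stateful scan with a locate-and-slice decomposition: split the lines at the first section header, split its body off at the next header, rewrite the body locally (replace first key line, drop later ones, append if absent), and clean later occurrences in the tail.
-- intended difference: When the target section header is the very last line of the text (and the header occurs nowhere earlier), A returns the text without the key at all because its end-of-input insertion check only fires on non-header lines, while B appends 'key = value' inside the section, which is the intended upsert behaviour. — e.g. on upsert_section_value("[s]", "s", "k", "v"): A returns "[s]\n", B returns "[s]\nk = v\n"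
import Mathlib
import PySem

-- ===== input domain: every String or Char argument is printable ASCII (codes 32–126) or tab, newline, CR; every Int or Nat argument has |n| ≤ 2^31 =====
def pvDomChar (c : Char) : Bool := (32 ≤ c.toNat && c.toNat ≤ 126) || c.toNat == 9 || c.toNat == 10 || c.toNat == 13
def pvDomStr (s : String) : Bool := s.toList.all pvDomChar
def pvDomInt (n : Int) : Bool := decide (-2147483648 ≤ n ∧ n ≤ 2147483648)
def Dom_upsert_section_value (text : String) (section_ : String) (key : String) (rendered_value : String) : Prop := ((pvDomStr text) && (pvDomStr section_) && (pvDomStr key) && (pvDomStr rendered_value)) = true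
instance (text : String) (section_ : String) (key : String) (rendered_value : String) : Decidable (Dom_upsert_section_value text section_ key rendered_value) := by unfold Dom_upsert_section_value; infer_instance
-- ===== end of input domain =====

-- B replaces A's single four-flag stateful scan by a locate-and-slice decomposition (find the
-- section, rewrite its body locally, clean the tail); on the corner where the section header is
-- the last line A silently drops the upsert and B performs it (see D_ below). Objective: alternative.

-- ===== PORT A =====
-- loop body of A's for-loop; state = (out, in_section, section_found, key_written), p = (index, line)
def upsertA_step (n : Int) (header replacement keyprefix : String)
    (st : List String × Bool × Bool × Bool) (p : Int × String) : List String × Bool × Bool × Bool :=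
  let stripped := PySem.Str.strip p.2
  let is_header := PySem.Str.startswith stripped "[" && PySem.Str.endswith stripped "]"
  if is_header then
    let out := if st.2.1 && !st.2.2.2 then st.1 ++ [replacement] else st.1
    let key_written := st.2.2.2 || st.2.1
    let in_section := stripped == header
    (out ++ [p.2], in_section, st.2.2.1 || in_section, key_written)
  else if st.2.1 && PySem.Str.startswith stripped keyprefix then
    if !st.2.2.2 then (st.1 ++ [replacement], st.2.1, st.2.2.1, true)
    else (st.1, st.2.1, st.2.2.1, st.2.2.2)
  else
    let out := st.1 ++ [p.2]
    if p.1 == n - 1 && st.2.1 && !st.2.2.2 then (out ++ [replacement], st.2.1, st.2.2.1, true)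
    else (out, st.2.1, st.2.2.1, st.2.2.2)

def upsert_section_value (text : String) (section_ : String) (key : String) (rendered_value : String) : String :=
  let header := "[" ++ section_ ++ "]"
  let replacement := key ++ " = " ++ rendered_value
  let lines := PySem.Str.splitlines text
  let st := (PySem.List.enumerate lines).foldl
      (upsertA_step (lines.length : Int) header replacement (key ++ " =")) ([], false, false, false)
  if st.2.2.1 then
    PySem.Str.rstrip (PySem.Str.join "\n" st.1) ++ "\n"
  else
    let pfx := PySem.Str.rstrip text
    let pfx := if pfx ≠ "" then pfx ++ "\n\n" else pfx
    pfx ++ "[" ++ section_ ++ "]\n" ++ replacement ++ "\n"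

-- ===== PORT B =====
def upsertB_isHeader (line : String) : Bool :=
  let s := PySem.Str.strip line
  PySem.Str.startswith s "[" && PySem.Str.endswith s "]"

-- while rest and rest[0].strip() != header: pre.append(rest[0]); rest = rest[1:]
def upsertB_splitPre (header : String) : List String → List String × List String
  | [] => ([], [])
  | l :: rest =>
    if PySem.Str.strip l == header then ([], l :: rest)
    else
      let r := upsertB_splitPre header rest
      (l :: r.1, r.2)

-- while after and not is_header_line(after[0]): body.append(after[0]); after = after[1:]
def upsertB_splitBody : List String → List String × List String
  | [] => ([], [])
  | l :: rest =>
    if upsertB_isHeader l then ([], l :: rest)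
    else
      let r := upsertB_splitBody rest
      (l :: r.1, r.2)

-- loop body of the body-rewrite loop; state = (new_body, replaced)
def upsertB_bodyStep (replacement keyprefix : String)
    (st : List String × Bool) (line : String) : List String × Bool :=
  if PySem.Str.startswith (PySem.Str.strip line) keyprefix then
    if !st.2 then (st.1 ++ [replacement], true) else st
  else (st.1 ++ [line], st.2)

-- loop body of the tail-cleaning loop; state = (cleaned, inside)
def upsertB_tailStep (header keyprefix : String)
    (st : List String × Bool) (line : String) : List String × Bool :=
  if upsertB_isHeader line then (st.1 ++ [line], PySem.Str.strip line == header)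
  else if st.2 && PySem.Str.startswith (PySem.Str.strip line) keyprefix then st
  else (st.1 ++ [line], st.2)

def upsert_section_value_alt (text : String) (section_ : String) (key : String) (rendered_value : String) : String :=
  let header := "[" ++ section_ ++ "]"
  let replacement := key ++ " = " ++ rendered_value
  let keyprefix := key ++ " ="
  let lines := PySem.Str.splitlines text
  match upsertB_splitPre header lines with
  | (_, []) =>
    let pfx := PySem.Str.rstrip text
    let pfx := if pfx ≠ "" then pfx ++ "\n\n" else pfx
    pfx ++ header ++ "\n" ++ replacement ++ "\n"
  | (pre, head :: after0) =>
    let s2 := upsertB_splitBody after0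
    let nb := s2.1.foldl (upsertB_bodyStep replacement keyprefix) ([], false)
    let new_body := if !nb.2 then nb.1 ++ [replacement] else nb.1
    let cleaned := (s2.2.foldl (upsertB_tailStep header keyprefix) ([], false)).1
    PySem.Str.rstrip (PySem.Str.join "\n" (pre ++ [head] ++ new_body ++ cleaned)) ++ "\n"

-- ===== PRECONDITION & SPEC =====
-- When the target section header is the very last line of the text (and occurs nowhere earlier),
-- A returns the text without the key at all (its end-of-input insertion check only fires on
-- non-header lines), while B appends "key = rendered_value" inside the section, which is the
-- intended upsert behaviour.
def D_upsert_section_value (text : String) (section_ : String) (key : String) (rendered_value : String) : Prop :=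
  let lines := PySem.Str.splitlines text
  let header := "[" ++ section_ ++ "]"
  lines ≠ [] ∧ PySem.Str.strip (lines.getLastD "") = header ∧
    ∀ l ∈ lines.dropLast, PySem.Str.strip l ≠ header

instance (text : String) (section_ : String) (key : String) (rendered_value : String) : Decidable (D_upsert_section_value text section_ key rendered_value) := by unfold D_upsert_section_value; infer_instance

def Spec_upsert_section_value (text : String) (section_ : String) (key : String) (rendered_value : String) (out : String) : Prop := ¬ D_upsert_section_value text section_ key rendered_value → out = upsert_section_value_alt text section_ key rendered_value
instance (text : String) (section_ : String) (key : String) (rendered_value : String) (out : String) : Decidable (Spec_upsert_section_value text section_ key rendered_value out) := by unfold Spec_upsert_section_value; infer_instance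

def pvDiffWitness_upsert_section_value : String × String × String × String := ("[s]", "s", "k", "v")
def pvDiffWitnessOut_upsert_section_value : String × String := ("[s]\n", "[s]\nk = v\n")

-- ===== CLAIM (what is proved, stated in full; the proofs are below) =====
def Claim_unchanged_upsert_section_value : Prop := ∀ (text : String) (section_ : String) (key : String) (rendered_value : String), Dom_upsert_section_value text section_ key rendered_value → Spec_upsert_section_value text section_ key rendered_value (upsert_section_value text section_ key rendered_value)
def Claim_changed_upsert_section_value : Prop := Dom_upsert_section_value (pvDiffWitness_upsert_section_value.1) (pvDiffWitness_upsert_section_value.2.1) (pvDiffWitness_upsert_section_value.2.2.1) (pvDiffWitness_upsert_section_value.2.2.2) ∧ D_upsert_section_value (pvDiffWitness_upsert_section_value.1) (pvDiffWitness_upsert_section_value.2.1) (pvDiffWitness_upsert_section_value.2.2.1) (pvDiffWitness_upsert_section_value.2.2.2) ∧ upsert_section_value (pvDiffWitness_upsert_section_value.1) (pvDiffWitness_upsert_section_value.2.1) (pvDiffWitness_upsert_section_value.2.2.1) (pvDiffWitness_upsert_section_value.2.2.2) = pvDiffWitnessOut_upsert_section_value.1 ∧ upsert_section_value_alt (pvDiffWitness_upsert_section_value.1)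 (pvDiffWitness_upsert_section_value.2.1) (pvDiffWitness_upsert_section_value.2.2.1) (pvDiffWitness_upsert_section_value.2.2.2) = pvDiffWitnessOut_upsert_section_value.2 ∧ pvDiffWitnessOut_upsert_section_value.1 ≠ pvDiffWitnessOut_upsert_section_value.2

def Claim_exact_upsert_section_value : Prop := ∀ (text : String) (section_ : String) (key : String) (rendered_value : String), Dom_upsert_section_value text section_ key rendered_value → D_upsert_section_value text section_ key rendered_value → upsert_section_value text section_ key rendered_value ≠ upsert_section_value_alt text section_ key rendered_value

-- ===== LEMMAS AND PROOFS =====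

-- abbreviations used only by the proofs
def pvM (hdr l : String) : Bool := PySem.Str.strip l == hdr
def pvK (kp l : String) : Bool := PySem.Str.startswith (PySem.Str.strip l) kp

-- structural recursion equivalent of A's loop: on (remaining lines, in_section, found, key_written),
-- returns (emitted suffix, in_section', found', key_written')
def runA (hdr repl kp : String) : List String → Bool → Bool → Bool → List String × Bool × Bool × Bool
  | [], insec, found, kw => ([], insec, found, kw)
  | l :: rest, insec, found, kw =>
    if upsertB_isHeader l then
      let pre := if insec && !kw then [repl] else []
      let insec' := pvM hdr l
      let r := runA hdr repl kp rest insec' (found || insec') (kw || insec)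
      (pre ++ l :: r.1, r.2)
    else if insec && pvK kp l then
      let r := runA hdr repl kp rest insec found true
      ((if !kw then [repl] else []) ++ r.1, r.2)
    else if rest.isEmpty && insec && !kw then
      (l :: [repl], insec, found, true)
    else
      let r := runA hdr repl kp rest insec found kw
      (l :: r.1, r.2)

-- structural recursion equivalents of B's two foldl loops
def runBody (repl kp : String) : List String → Bool → List String × Bool
  | [], flag => ([], flag)
  | l :: rest, flag =>
    if pvK kp l then
      if !flag then
        let r := runBody repl kp rest true
        (repl :: r.1, r.2)
      else runBody repl kp rest flag
    else
      let r := runBody repl kp rest flag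
      (l :: r.1, r.2)

def runTail (hdr kp : String) : List String → Bool → List String
  | [], _ => []
  | l :: rest, inside =>
    if upsertB_isHeader l then l :: runTail hdr kp rest (pvM hdr l)
    else if inside && pvK kp l then runTail hdr kp rest inside
    else l :: runTail hdr kp rest inside

lemma foldA_eq (hdr repl kp : String) (xs : List String) : ∀ (s n : Int) (out : List String)
    (insec found kw : Bool), s + xs.length = n →
    (PySem.List.enumerate xs s).foldl (upsertA_step n hdr repl kp) (out, insec, found, kw)
      = (out ++ (runA hdr repl kp xs insec found kw).1, (runA hdr repl kp xs insec found kw).2) := by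
  induction xs with
  | nil =>
    intro s n out insec found kw h
    simp [runA, PySem.List.enumerate]
  | cons l rest ih =>
    intro s n out insec found kw h
    have hlen : s + 1 + (rest.length : Int) = n := by
      simp at h; omega
    have hidx : (s == n - 1) = rest.isEmpty := by
      cases rest with
      | nil => simp at hlen ⊢; omega
      | cons a t =>
        simp only [List.isEmpty_cons, beq_eq_false_iff_ne, ne_eq]
        simp at hlen; omega
    rw [PySem.List.enumerate_cons, List.foldl_cons]
    simp only [upsertA_step, runA, upsertB_isHeader, pvM, pvK, hidx]
    by_cases hh : (PySem.Str.startswith (PySem.Str.strip l) "[" && PySem.Str.endswith (PySem.Str.strip l) "]") = true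
    · rw [if_pos hh, if_pos hh]
      rw [ih (s+1) n _ _ _ _ hlen]
      by_cases hc : (insec && !kw) = true <;> simp [hc, List.append_assoc]
    · rw [if_neg hh, if_neg hh]
      by_cases hk : (insec && PySem.Str.startswith (PySem.Str.strip l) (kp)) = true
      · rw [if_pos hk, if_pos hk]
        by_cases hkw : kw = true
        · subst hkw
          rw [ih (s+1) n _ _ _ _ hlen]
          simp
        · have hkw' : kw = false := by simp [hkw]
          subst hkw'
          rw [ih (s+1) n _ _ _ _ hlen]
          simp [List.append_assoc]
      · rw [if_neg hk, if_neg hk]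
        by_cases hc : (rest.isEmpty && insec && !kw) = true
        · rw [if_pos hc, if_pos hc]
          have hrest : rest = [] := by
            rcases rest with _ | _
            · rfl
            · simp at hc
          subst hrest
          simp [PySem.List.enumerate, List.append_assoc]
        · rw [if_neg hc, if_neg hc]
          rw [ih (s+1) n _ _ _ _ hlen]
          simp [List.append_assoc]

lemma runBody_flag_true (repl kp : String) (xs : List String) :
    (runBody repl kp xs true).2 = true := by
  induction xs with
  | nil => rfl
  | cons l rest ih => simp only [runBody]; split_ifs <;> simp [ih]

lemma foldBody_eq (repl kp : String) (xs : List String) : ∀ (acc : List String) (flag : Bool),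
    xs.foldl (upsertB_bodyStep repl kp) (acc, flag)
      = (acc ++ (runBody repl kp xs flag).1, (runBody repl kp xs flag).2) := by
  induction xs with
  | nil => intro acc flag; simp [runBody]
  | cons l rest ih =>
    intro acc flag
    simp only [List.foldl_cons, upsertB_bodyStep, runBody, pvK]
    split_ifs with h1 h2 <;> simp [ih]

lemma foldTail_eq (hdr kp : String) (xs : List String) : ∀ (acc : List String) (inside : Bool),
    (xs.foldl (upsertB_tailStep hdr kp) (acc, inside)).1 = acc ++ runTail hdr kp xs inside := by
  induction xs with
  | nil => intro acc inside; simp [runTail]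
  | cons l rest ih =>
    intro acc inside
    simp only [List.foldl_cons, upsertB_tailStep, runTail, pvK, pvM]
    split_ifs with h1 h2 <;> simp [ih]

lemma runA_found_true (hdr repl kp : String) (xs : List String) : ∀ (insec kw : Bool),
    (runA hdr repl kp xs insec true kw).2.2.1 = true := by
  induction xs with
  | nil => intro insec kw; rfl
  | cons l rest ih =>
    intro insec kw
    simp only [runA]
    split_ifs <;> simp [ih]

-- lines with no occurrence of the header pass through untouched while in_section is false
lemma runA_nosec (hdr repl kp : String) (xs : List String)
    (h : ∀ l ∈ xs, pvM hdr l = false) : ∀ (found kw : Bool),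
    runA hdr repl kp xs false found kw = (xs, false, found, kw) := by
  induction xs with
  | nil => intro found kw; rfl
  | cons l rest ih =>
    intro found kw
    have hl : pvM hdr l = false := h l (by simp)
    have hrest : ∀ x ∈ rest, pvM hdr x = false := fun x hx => h x (by simp [hx])
    simp only [runA, hl]
    split_ifs with h1 h2 <;> simp_all [ih hrest]

lemma runA_prefix (hdr repl kp : String) (pre : List String)
    (h : ∀ l ∈ pre, pvM hdr l = false) : ∀ (rest : List String) (found kw : Bool),
    runA hdr repl kp (pre ++ rest) false found kw
      = ((pre ++ (runA hdr repl kp rest false found kw).1), (runA hdr repl kp rest false found kw).2) := by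
  induction pre with
  | nil => intro rest found kw; simp
  | cons l pre' ih =>
    intro rest found kw
    have hl : pvM hdr l = false := h l (by simp)
    have hpre : ∀ x ∈ pre', pvM hdr x = false := fun x hx => h x (by simp [hx])
    by_cases h1 : upsertB_isHeader l = true <;>
      simp [runA, hl, h1, ih hpre]

-- with key_written the A loop only drops key lines, exactly B's tail cleaner
lemma runA_kw (hdr repl kp : String) (xs : List String) : ∀ (insec found : Bool),
    (runA hdr repl kp xs insec found true).1 = runTail hdr kp xs insec := by
  induction xs with
  | nil => intro insec found; rfl
  | cons l rest ih =>
    intro insec found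
    simp only [runA, runTail]
    by_cases h1 : upsertB_isHeader l = true
    · simp [h1, ih]
    · by_cases h2 : (insec && pvK kp l) = true
      · simp [h1, h2, ih]
      · simp [h1, h2, ih]

-- the tail is empty or starts with a header, so the initial inside flag is irrelevant
lemma runTail_head (hdr kp : String) (tail : List String)
    (h : tail = [] ∨ ∃ t ts, tail = t :: ts ∧ upsertB_isHeader t = true) (b b' : Bool) :
    runTail hdr kp tail b = runTail hdr kp tail b' := by
  rcases h with h | ⟨t, ts, rfl, ht⟩
  · subst h; rfl
  · simp [runTail, ht]

lemma runTail_append (hdr kp : String) (body : List String)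
    (h : ∀ l ∈ body, upsertB_isHeader l = false) : ∀ (tail : List String),
    runTail hdr kp (body ++ tail) true = (runBody "" kp body true).1 ++ runTail hdr kp tail true := by
  induction body with
  | nil => intro tail; simp [runBody]
  | cons l body' ih =>
    intro tail
    have hl : upsertB_isHeader l = false := h l (by simp)
    have hb : ∀ x ∈ body', upsertB_isHeader x = false := fun x hx => h x (by simp [hx])
    by_cases h1 : pvK kp l = true <;>
      simp [List.cons_append, runTail, runBody, hl, h1, ih hb tail]

lemma runBody_any_repl (repl repl' kp : String) (xs : List String) :
    (runBody repl kp xs true).1 = (runBody repl' kp xs true).1 := by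
  induction xs with
  | nil => rfl
  | cons l rest ih =>
    simp only [runBody]
    split_ifs <;> simp_all

-- the heart: A's in-section processing equals B's body rewrite plus tail cleaning
lemma runA_body (hdr repl kp : String) (body : List String)
    (hb : ∀ l ∈ body, upsertB_isHeader l = false) : ∀ (tail : List String)
    (ht : tail = [] ∨ ∃ t ts, tail = t :: ts ∧ upsertB_isHeader t = true)
    (hne : ¬(body = [] ∧ tail = [])) (found : Bool),
    (runA hdr repl kp (body ++ tail) true found false).1
      = (if !(runBody repl kp body false).2 then (runBody repl kp body false).1 ++ [repl]
         else (runBody repl kp body false).1) ++ runTail hdr kp tail true := by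
  induction body with
  | nil =>
    intro tail ht hne found
    rcases ht with rfl | ⟨t, ts, rfl, hht⟩
    · exact absurd ⟨rfl, rfl⟩ hne
    · simp [runA, runTail, runBody, hht, runA_kw]
  | cons b body' ih =>
    intro tail ht hne found
    have hb' : upsertB_isHeader b = false := hb b (by simp)
    have hbody' : ∀ l ∈ body', upsertB_isHeader l = false := fun x hx => hb x (by simp [hx])
    simp only [List.cons_append, runA, runBody, hb']
    by_cases hk : pvK kp b = true
    · simp only [hk, Bool.true_and, Bool.not_false, if_pos]
      rw [runA_kw, runTail_append hdr kp body' hbody' tail,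
        runBody_any_repl "" repl kp body']
      have hfl := runBody_flag_true repl kp body'
      simp [hfl]
    · by_cases hc : ((body' ++ tail).isEmpty) = true
      · have hbt := List.isEmpty_iff.mp hc
        rcases List.append_eq_nil_iff.mp hbt with ⟨rfl, rfl⟩
        simp [runBody, runTail, hk]
      · have hne' : ¬(body' = [] ∧ tail = []) := by
          rintro ⟨rfl, rfl⟩; simp at hc
        rw [ih hbody' tail ht hne' found]  -- careful: hypothesis name
        by_cases hfl : (runBody repl kp body' false).2 = true <;>
          simp [hk, hc, hfl, List.append_assoc]

-- splitPre facts
lemma splitPre_append (hdr : String) (xs : List String) :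
    (upsertB_splitPre hdr xs).1 ++ (upsertB_splitPre hdr xs).2 = xs := by
  induction xs with
  | nil => rfl
  | cons l rest ih =>
    simp only [upsertB_splitPre]
    split_ifs <;> simp [ih]

lemma splitPre_pre (hdr : String) (xs : List String) :
    ∀ l ∈ (upsertB_splitPre hdr xs).1, pvM hdr l = false := by
  induction xs with
  | nil => intro l hl; simp [upsertB_splitPre] at hl
  | cons l rest ih =>
    simp only [upsertB_splitPre]
    split_ifs with h1
    · intro x hx; simp at hx
    · intro x hx
      rcases List.mem_cons.mp hx with rfl | hx
      · simp [pvM, h1]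
      · exact ih x hx

lemma splitPre_rest (hdr : String) (xs : List String) :
    (upsertB_splitPre hdr xs).2 = [] ∨
      ∃ h t, (upsertB_splitPre hdr xs).2 = h :: t ∧ pvM hdr h = true := by
  induction xs with
  | nil => left; rfl
  | cons l rest ih =>
    simp only [upsertB_splitPre]
    split_ifs with h1
    · right; exact ⟨l, rest, rfl, h1⟩
    · exact ih

lemma splitPre_none (hdr : String) (xs : List String)
    (h : (upsertB_splitPre hdr xs).2 = []) : ∀ l ∈ xs, pvM hdr l = false := by
  induction xs with
  | nil => intro l hl; simp at hl
  | cons l rest ih =>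
    intro x hx
    simp only [upsertB_splitPre] at h
    by_cases h1 : (PySem.Str.strip l == hdr) = true
    · rw [if_pos h1] at h; simp at h
    · rw [if_neg h1] at h
      rcases List.mem_cons.mp hx with rfl | hx
      · simp [pvM, h1]
      · exact ih h x hx

-- splitBody facts
lemma splitBody_append (xs : List String) :
    (upsertB_splitBody xs).1 ++ (upsertB_splitBody xs).2 = xs := by
  induction xs with
  | nil => rfl
  | cons l rest ih =>
    simp only [upsertB_splitBody]
    split_ifs <;> simp [ih]

lemma splitBody_body (xs : List String) :
    ∀ l ∈ (upsertB_splitBody xs).1, upsertB_isHeader l = false := by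
  induction xs with
  | nil => intro l hl; simp [upsertB_splitBody] at hl
  | cons l rest ih =>
    simp only [upsertB_splitBody]
    split_ifs with h1
    · intro x hx; simp at hx
    · intro x hx
      rcases List.mem_cons.mp hx with rfl | hx
      · simp [h1]
      · exact ih x hx

lemma splitBody_tail (xs : List String) :
    (upsertB_splitBody xs).2 = [] ∨
      ∃ t ts, (upsertB_splitBody xs).2 = t :: ts ∧ upsertB_isHeader t = true := by
  induction xs with
  | nil => left; rfl
  | cons l rest ih =>
    simp only [upsertB_splitBody]
    split_ifs with h1
    · right; exact ⟨l, rest, rfl, h1⟩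
    · exact ih

-- a line stripping to "[section]" is a header line
lemma pvM_isHeader (section_ l : String) (h : pvM ("[" ++ section_ ++ "]") l = true) :
    upsertB_isHeader l = true := by
  have heq : PySem.Str.strip l = "[" ++ section_ ++ "]" := by
    simpa [pvM] using h
  simp only [upsertB_isHeader, heq]
  rw [Bool.and_eq_true]
  refine ⟨by simp [PySem.Chars.startswith_iff], ?_⟩
  simp [PySem.Chars.endswith_iff]
  exact (List.suffix_append _ _).trans (List.suffix_cons _ _)

-- lemmas for the tightness theorem
lemma splitPre_eval (hdr : String) (pre : List String) (hd : String)
    (hpre : ∀ l ∈ pre, pvM hdr l = false) (hM : pvM hdr hd = true) :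
    upsertB_splitPre hdr (pre ++ [hd]) = (pre, [hd]) := by
  induction pre with
  | nil =>
    simp only [List.nil_append, upsertB_splitPre]
    rw [if_pos (by simpa [pvM] using hM)]
  | cons l r ih =>
    have hl := hpre l (by simp)
    simp only [List.cons_append, upsertB_splitPre]
    rw [if_neg (by simp only [pvM] at hl; simp [hl])]
    rw [ih (fun x hx => hpre x (by simp [hx]))]

lemma join_concat (sep : List Char) (xs : List (List Char)) (y : List Char) (h : xs ≠ []) :
    PySem.Chars.join sep (xs ++ [y]) = PySem.Chars.join sep xs ++ sep ++ y := by
  induction xs with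
  | nil => exact absurd rfl h
  | cons a rest ih =>
    cases rest with
    | nil => simp [PySem.Chars.join_singleton, PySem.Chars.join_cons_cons]
    | cons b r =>
      have ih' := ih (by simp)
      simp only [List.cons_append] at ih' ⊢
      simp [PySem.Chars.join_cons_cons, ih', List.append_assoc]

lemma rstrip_len_le (cs : List Char) : (PySem.Chars.rstrip cs).length ≤ cs.length := by
  simp only [PySem.Chars.rstrip, List.length_reverse]
  exact (List.length_dropWhile_le _ _).trans (by simp)

lemma rstrip_append_len (u v : List Char) (c : Char) (hc : c ∈ v)
    (hcs : PySem.Chars.isspace c = false) :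
    u.length < (PySem.Chars.rstrip (u ++ v)).length := by
  simp only [PySem.Chars.rstrip, List.reverse_append, List.length_reverse]
  rw [List.dropWhile_append]
  have hnil : ¬ (List.dropWhile PySem.Chars.isspace v.reverse = []) := by
    rw [List.dropWhile_eq_nil_iff]
    intro hall
    have := hall c (by simp [hc])
    simp [hcs] at this
  have hie : (List.dropWhile PySem.Chars.isspace v.reverse).isEmpty = false := by
    simpa [List.isEmpty_iff] using hnil
  rw [hie]
  simp only [Bool.false_eq_true, if_false, List.length_append, List.length_reverse]
  have : 0 < (List.dropWhile PySem.Chars.isspace v.reverse).length :=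
    List.length_pos_iff.mpr hnil
  omega

-- ===== VERDICT (by name: the statement is the Claim_ definition above) =====
theorem upsert_section_value_spec : Claim_unchanged_upsert_section_value := by
  intro text section_ key rendered_value _hDom hD
  -- abbreviations
  have hjoin : ("]" ++ "\n" : String) = "]\n" := rfl
  simp only [upsert_section_value, upsert_section_value_alt]
  rcases hsp : upsertB_splitPre ("[" ++ section_ ++ "]") (PySem.Str.splitlines text) with ⟨pre, rest⟩
  have hA := foldA_eq ("[" ++ section_ ++ "]") (key ++ " = " ++ rendered_value) (key ++ " =")
      (PySem.Str.splitlines text) 0 ((PySem.Str.splitlines text).length : Int) [] false false false (by simp)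
  rcases rest with _ | ⟨hd, after0⟩
  · -- section not found
    have hall : ∀ l ∈ PySem.Str.splitlines text, pvM ("[" ++ section_ ++ "]") l = false :=
      splitPre_none _ _ (by rw [hsp])
    rw [runA_nosec _ _ _ _ hall] at hA
    rw [hA]
    simp [← hjoin, String.append_assoc]
  · -- section found at hd
    have hsplit : PySem.Str.splitlines text = pre ++ hd :: after0 := by
      have h1 := splitPre_append ("[" ++ section_ ++ "]") (PySem.Str.splitlines text)
      rw [hsp] at h1; exact h1.symm
    have hpre : ∀ l ∈ pre, pvM ("[" ++ section_ ++ "]") l = false := by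
      have h1 := splitPre_pre ("[" ++ section_ ++ "]") (PySem.Str.splitlines text)
      rw [hsp] at h1; exact h1
    have hM : pvM ("[" ++ section_ ++ "]") hd = true := by
      rcases splitPre_rest ("[" ++ section_ ++ "]") (PySem.Str.splitlines text) with h1 | ⟨h', t', he, hm⟩
      · rw [hsp] at h1; simp at h1
      · rw [hsp] at he; injection he with he1 he2; rw [he1]; exact hm
    have hh : upsertB_isHeader hd = true := pvM_isHeader section_ hd hM
    rcases hsb : upsertB_splitBody after0 with ⟨body, tail⟩
    have hab : after0 = body ++ tail := by
      have h1 := splitBody_append after0; rw [hsb] at h1; exact h1.symm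
    have hbody : ∀ l ∈ body, upsertB_isHeader l = false := by
      have h1 := splitBody_body after0; rw [hsb] at h1; exact h1
    have htail : tail = [] ∨ ∃ t ts, tail = t :: ts ∧ upsertB_isHeader t = true := by
      have h1 := splitBody_tail after0; rw [hsb] at h1; exact h1
    have hne : ¬(body = [] ∧ tail = []) := by
      rintro ⟨rfl, rfl⟩
      simp only [List.append_nil] at hab
      subst hab
      apply hD
      unfold D_upsert_section_value
      refine ⟨by rw [hsplit]; simp, ?_, ?_⟩
      · rw [hsplit, show pre ++ hd :: ([] : List String) = pre ++ [hd] from rfl]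
        rw [show (pre ++ [hd]).getLastD "" = hd from by simp]
        simpa [pvM] using hM
      · rw [hsplit, show pre ++ hd :: ([] : List String) = pre ++ [hd] from rfl]
        rw [List.dropLast_concat]
        intro l hl
        simpa [pvM] using hpre l hl
    -- evaluate A's loop
    rw [hsplit] at hA
    rw [runA_prefix _ _ _ pre hpre] at hA
    have hstep : runA ("[" ++ section_ ++ "]") (key ++ " = " ++ rendered_value) (key ++ " =") (hd :: after0) false false false
        = (hd :: (runA ("[" ++ section_ ++ "]") (key ++ " = " ++ rendered_value) (key ++ " =") after0 true true false).1,
           (runA ("[" ++ section_ ++ "]") (key ++ " = " ++ rendered_value) (key ++ " =") after0 true true false).2) := by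
      simp [runA, hh, hM]
    rw [hstep] at hA
    have hfound := runA_found_true ("[" ++ section_ ++ "]") (key ++ " = " ++ rendered_value) (key ++ " =") after0 true false
    have hout : (runA ("[" ++ section_ ++ "]") (key ++ " = " ++ rendered_value) (key ++ " =") after0 true true false).1
        = (if !(runBody (key ++ " = " ++ rendered_value) (key ++ " =") body false).2
            then (runBody (key ++ " = " ++ rendered_value) (key ++ " =") body false).1 ++ [key ++ " = " ++ rendered_value]
            else (runBody (key ++ " = " ++ rendered_value) (key ++ " =") body false).1) ++ runTail ("[" ++ section_ ++ "]") (key ++ " =") tail true := by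
      rw [hab]; exact runA_body _ _ _ body hbody tail htail hne true
    rw [hsplit, hA]
    simp only [hfound, if_true, hsb]
    rw [foldBody_eq, foldTail_eq, hout]
    rw [runTail_head ("[" ++ section_ ++ "]") (key ++ " =") tail htail false true]
    simp [List.append_assoc]

theorem upsert_section_value_changed : Claim_changed_upsert_section_value := by
  unfold Claim_changed_upsert_section_value; decide

theorem upsert_section_value_tight : Claim_exact_upsert_section_value := by
  unfold Claim_exact_upsert_section_value
  intro text section_ key rendered_value _hDom hDc
  unfold D_upsert_section_value at hDc
  obtain ⟨hne, hlast, hearl⟩ := hDc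
  rcases List.eq_nil_or_concat (PySem.Str.splitlines text) with hnil | ⟨pre, hd, hsplit⟩
  · exact absurd hnil hne
  rw [List.concat_eq_append] at hsplit
  rw [hsplit] at hlast hearl
  have hlast' : PySem.Str.strip hd = "[" ++ section_ ++ "]" := by
    rwa [show (pre ++ [hd]).getLastD "" = hd from by simp] at hlast
  have hM : pvM ("[" ++ section_ ++ "]") hd = true := by simp [pvM, hlast']
  have hh := pvM_isHeader section_ hd hM
  have hpre : ∀ l ∈ pre, pvM ("[" ++ section_ ++ "]") l = false := by
    intro l hl
    have := hearl l (by rw [List.dropLast_concat]; exact hl)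
    simp [pvM, this]
  simp only [upsert_section_value, upsert_section_value_alt]
  rw [hsplit]
  have hA := foldA_eq ("[" ++ section_ ++ "]") (key ++ " = " ++ rendered_value) (key ++ " =")
      (pre ++ [hd]) 0 ((pre ++ [hd]).length : Int) [] false false false (by simp)
  rw [runA_prefix _ _ _ pre hpre] at hA
  have hstep : runA ("[" ++ section_ ++ "]") (key ++ " = " ++ rendered_value) (key ++ " =") [hd] false false false
      = ([hd], true, true, false) := by
    simp [runA, hh, hM]
  rw [hstep] at hA
  rw [hA, splitPre_eval _ pre hd hpre hM]
  simp only [upsertB_splitBody, List.foldl_nil, List.nil_append, List.append_nil,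
    Bool.not_false, if_true]
  intro heq
  have h1 := congrArg (fun s : String => s.toList.length) heq
  simp only [String.toList_append, List.length_append, PySem.Str.toList_rstrip,
    PySem.Str.toList_join] at h1
  have hmapne : (pre ++ [hd]).map String.toList ≠ [] := by simp
  have hJB : PySem.Chars.join "\n".toList ((pre ++ [hd] ++ [key ++ " = " ++ rendered_value]).map String.toList)
      = (PySem.Chars.join "\n".toList ((pre ++ [hd]).map String.toList) ++ "\n".toList)
        ++ (key ++ " = " ++ rendered_value).toList := by
    rw [show pre ++ [hd] ++ [key ++ " = " ++ rendered_value]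
        = (pre ++ [hd]) ++ [key ++ " = " ++ rendered_value] from rfl]
    rw [List.map_append,
      show List.map String.toList [key ++ " = " ++ rendered_value]
        = [(key ++ " = " ++ rendered_value).toList] from rfl,
      join_concat _ _ _ hmapne]
  rw [hJB] at h1
  have hmem : '=' ∈ (key ++ " = " ++ rendered_value).toList := by
    have : '=' ∈ (" = " : String).toList := by decide
    simp [String.toList_append]
  have h2 := rstrip_append_len
      (PySem.Chars.join "\n".toList ((pre ++ [hd]).map String.toList) ++ "\n".toList)
      ((key ++ " = " ++ rendered_value).toList) '=' hmem (by decide)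
  have h3 := rstrip_len_le (PySem.Chars.join "\n".toList ((pre ++ [hd]).map String.toList))
  simp only [List.length_append] at h1 h2
  have hnl : ("\n" : String).toList.length = 1 := by decide
  omega
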